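-- pv_equiv track=rewrite | github.com/Sunkarasasikumar/codemind-python | Airport__authority.py | weight_machine
-- ===== SOURCE A (Python) =====
-- def weight_machine(N,l,t):
--     cost=0
--     for i in l:
--         if i>t:
--             cost+=2
--         else:
--             cost+=1
--     return cost
-- ===== SOURCE B (Python) =====
-- def weight_machine(N, l, t):
--     s = sorted(l)
--     lo, hi = 0, len(s)
--     while lo < hi:
--         mid = (lo + hi) // 2
--         if s[mid] > t:
--             hi = mid
--         else:
--             lo = mid + 1
--     return len(s) + (len(s) - lo)
-- ===== Notes on version B (the rewrite author's own statement) =====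
-- stated objective: alternative
-- what changed: Instead of accumulating 2-or-1 per element in one branchy pass, B sorts the list and binary-searches for the first element strictly greater than t, returning len(l) plus the size of that suffix; correct because sorting does not change how many elements exceed t.
import Mathlib
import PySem

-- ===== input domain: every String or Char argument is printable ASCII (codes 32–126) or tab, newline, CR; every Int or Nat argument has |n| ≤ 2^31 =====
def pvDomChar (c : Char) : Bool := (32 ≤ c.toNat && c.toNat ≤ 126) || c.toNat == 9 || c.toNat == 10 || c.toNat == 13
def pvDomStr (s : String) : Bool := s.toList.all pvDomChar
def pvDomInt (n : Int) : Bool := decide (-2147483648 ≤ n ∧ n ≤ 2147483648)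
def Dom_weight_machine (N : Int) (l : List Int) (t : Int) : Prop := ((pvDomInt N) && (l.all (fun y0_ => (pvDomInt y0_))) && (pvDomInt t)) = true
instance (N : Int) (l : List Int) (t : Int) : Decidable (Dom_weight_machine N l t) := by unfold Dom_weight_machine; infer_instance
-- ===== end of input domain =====

-- B replaces A's branchy 2-or-1 accumulation with sort + binary search: len(l) plus the size
-- of the sorted suffix of elements strictly greater than t (alternative algorithm, not faster).

-- ===== PORT A =====
def weight_machine (N : Int) (l : List Int) (t : Int) : Int :=
  l.foldl (fun cost i => if i > t then cost + 2 else cost + 1) 0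

-- ===== PORT B =====
-- the while lo < hi binary-search loop of Source B; s[mid] is always in range since
-- lo < hi ≤ len s, so getD's default is never used (exact on every reachable index)
def wmBisect (s : List Int) (t : Int) (lo hi : Nat) : Nat :=
  if lo < hi then
    let mid := (lo + hi) / 2
    if s.getD mid 0 > t then wmBisect s t lo mid
    else wmBisect s t (mid + 1) hi
  else lo
termination_by hi - lo
decreasing_by all_goals omega

def weight_machine_alt (N : Int) (l : List Int) (t : Int) : Int :=
  let s := PySem.List.sorted l (fun x => x) false
  let lo := wmBisect s t 0 s.length
  (s.length : Int) + ((s.length : Int) - (lo : Int))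

-- ===== PRECONDITION & SPEC =====
def Spec_weight_machine (N : Int) (l : List Int) (t : Int) (out : Int) : Prop := out = weight_machine_alt N l t
instance (N : Int) (l : List Int) (t : Int) (out : Int) : Decidable (Spec_weight_machine N l t out) := by unfold Spec_weight_machine; infer_instance

-- ===== CLAIM (what is proved, stated in full; the proofs are below) =====
def Claim_equal_weight_machine : Prop := ∀ (N : Int) (l : List Int) (t : Int), Dom_weight_machine N l t → Spec_weight_machine N l t (weight_machine N l t)

-- ===== LEMMAS AND PROOFS =====
theorem wm_fold_shift (l : List Int) (t c : Int) :
    l.foldl (fun cost i => if i > t then cost + 2 else cost + 1) c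
      = c + (l.length : Int) + ((l.filter (fun i => decide (i > t))).length : Int) := by
  induction l generalizing c with
  | nil => simp
  | cons x xs ih =>
    simp only [List.foldl_cons, List.filter_cons, List.length_cons]
    by_cases h : x > t
    · simp [h, ih]; ring
    · simp [h, ih]; ring

-- the binary search maintains: everything left of lo is ≤ t, everything from hi on is > t
theorem wmBisect_spec (s : List Int) (t : Int)
    (hs : ∀ (i j : Nat) (hij : i ≤ j) (hj : j < s.length), s[i]'(by omega) ≤ s[j]) :
    ∀ fuel lo hi, hi - lo ≤ fuel → hi ≤ s.length → lo ≤ hi →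
    (∀ i, i < lo → (h : i < s.length) → s[i] ≤ t) →
    (∀ i, hi ≤ i → (h : i < s.length) → t < s[i]) →
    wmBisect s t lo hi ≤ s.length ∧
      (∀ i, i < wmBisect s t lo hi → (h : i < s.length) → s[i] ≤ t) ∧
      (∀ i, wmBisect s t lo hi ≤ i → (h : i < s.length) → t < s[i]) := by
  intro fuel
  induction fuel with
  | zero =>
    intro lo hi hfuel hlen hle hlo hhi
    have : ¬ lo < hi := by omega
    rw [wmBisect, if_neg this]
    exact ⟨by omega, fun i hi' h => hlo i (by omega) h, fun i hi' h => hhi i (by omega) h⟩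
  | succ n ih =>
    intro lo hi hfuel hlen hle hlo hhi
    rw [wmBisect]
    by_cases hlt : lo < hi
    · rw [if_pos hlt]
      have hmidlt : (lo + hi) / 2 < s.length := by omega
      have hget : s.getD ((lo + hi) / 2) 0 = s[(lo + hi) / 2] := List.getD_eq_getElem s 0 hmidlt
      by_cases hc : s.getD ((lo + hi) / 2) 0 > t
      · rw [if_pos hc]
        refine ih lo ((lo + hi) / 2) (by omega) (by omega) (by omega) hlo ?_
        intro i hge h
        calc t < s[(lo + hi) / 2] := by rw [← hget]; exact hc
          _ ≤ s[i] := hs _ i hge h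
      · rw [if_neg hc]
        refine ih ((lo + hi) / 2 + 1) hi (by omega) hlen (by omega) ?_ hhi
        intro i hilt h
        calc s[i] ≤ s[(lo + hi) / 2] := hs i _ (by omega) hmidlt
          _ ≤ t := by rw [← hget] at *; omega
    · rw [if_neg hlt]
      exact ⟨by omega, fun i hi' h => hlo i (by omega) h, fun i hi' h => hhi i (by omega) h⟩

-- if p is false strictly below r and true from r on, the filter is exactly the drop-r suffix
theorem filter_length_split (s : List Int) (p : Int → Bool) (r : Nat) (hr : r ≤ s.length)
    (h1 : ∀ i, i < r → (h : i < s.length) → p s[i] = false)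
    (h2 : ∀ i, r ≤ i → (h : i < s.length) → p s[i] = true) :
    (s.filter p).length = s.length - r := by
  have hsplit : s = s.take r ++ s.drop r := (List.take_append_drop r s).symm
  rw [hsplit, List.filter_append]
  have htake : (s.take r).filter p = [] := by
    rw [List.filter_eq_nil_iff]
    intro a ha
    obtain ⟨i, hi, hgi⟩ := List.mem_iff_getElem.mp ha
    have hi' : i < s.length := by
      have := s.length_take_le r; simp at hi ⊢; omega
    have : (s.take r)[i] = s[i] := List.getElem_take
    rw [this] at hgi
    rw [← hgi]
    simp [h1 i (by simp at hi; omega) hi']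
  have hdrop : (s.drop r).filter p = s.drop r := by
    rw [List.filter_eq_self]
    intro a ha
    obtain ⟨i, hi, hgi⟩ := List.mem_iff_getElem.mp ha
    have hi' : r + i < s.length := by simp at hi; omega
    have : (s.drop r)[i] = s[r + i] := by
      rw [List.getElem_drop]
    rw [this] at hgi
    rw [← hgi]
    exact h2 (r + i) (by omega) hi'
  rw [htake, hdrop]
  simp

-- ===== VERDICT (by name: the statement is the Claim_ definition above) =====
theorem weight_machine_spec : Claim_equal_weight_machine := by
  intro N l t _
  unfold Spec_weight_machine weight_machine weight_machine_alt
  dsimp only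
  set s := PySem.List.sorted l (fun x => x) false with hsdef
  have hperm : s.Perm l := PySem.List.sorted_perm l (fun x => x) false
  have hmono : ∀ (i j : Nat) (hij : i ≤ j) (hj : j < s.length), s[i]'(by omega) ≤ s[j] := by
    intro i j hij hj
    exact PySem.List.key_sorted_getElem_mono l (fun x => x) hij hj
  obtain ⟨hle, hbelow, habove⟩ :=
    wmBisect_spec s t hmono s.length 0 s.length (by omega) le_rfl (Nat.zero_le _)
      (by intro i hi; omega) (by intro i hge h; omega)
  have hcount : (s.filter (fun i => decide (i > t))).length
      = s.length - wmBisect s t 0 s.length := by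
    apply filter_length_split s _ _ hle
    · intro i hi h
      simp only [decide_eq_false_iff_not, not_lt]
      exact hbelow i hi h
    · intro i hi h
      simp only [decide_eq_true_eq]
      exact habove i hi h
  have hfilt : (l.filter (fun i => decide (i > t))).length
      = (s.filter (fun i => decide (i > t))).length :=
    ((hperm.filter _).length_eq).symm
  have hlen : s.length = l.length := hperm.length_eq
  rw [wm_fold_shift, hfilt, hcount]
  omega
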